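-- pv_equiv track=rewrite | github.com/FernandaSouzaa/PISI2 | FlyFood.py | dist_total
-- ===== SOURCE A (Python) =====
-- def distancia_entre_dois_pontos(ponto1,ponto2):
--     distancia = abs(ponto1[1] - ponto2[1]) + abs(ponto1[2] - ponto2[2])
--     return distancia
--
-- def dist_total(r,lista_p):
--     cont = 0
--     inicio = r
--     for i in lista_p:
--         cont = cont + distancia_entre_dois_pontos(inicio,i)
--         inicio = i
--     cont = cont + distancia_entre_dois_pontos(inicio,r)
--     return cont
-- ===== SOURCE B (Python) =====
-- def dist_total(r, lista_p):
--     # Recursive descent: the closing leg back to r is the base case.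
--     def tour(p, rest):
--         if not rest:
--             return abs(p[1] - r[1]) + abs(p[2] - r[2])
--         q = rest[0]
--         return abs(p[1] - q[1]) + abs(p[2] - q[2]) + tour(q, rest[1:])
--     return tour(r, lista_p)
-- ===== Notes on version B (the rewrite author's own statement) =====
-- stated objective: alternative
-- what changed: B replaces A's imperative loop with accumulator and previous-point variable by a structural recursion on the remaining points, in which the closing leg back to r is the base case and each step adds one leg to the recursive result.
import Mathlib
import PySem

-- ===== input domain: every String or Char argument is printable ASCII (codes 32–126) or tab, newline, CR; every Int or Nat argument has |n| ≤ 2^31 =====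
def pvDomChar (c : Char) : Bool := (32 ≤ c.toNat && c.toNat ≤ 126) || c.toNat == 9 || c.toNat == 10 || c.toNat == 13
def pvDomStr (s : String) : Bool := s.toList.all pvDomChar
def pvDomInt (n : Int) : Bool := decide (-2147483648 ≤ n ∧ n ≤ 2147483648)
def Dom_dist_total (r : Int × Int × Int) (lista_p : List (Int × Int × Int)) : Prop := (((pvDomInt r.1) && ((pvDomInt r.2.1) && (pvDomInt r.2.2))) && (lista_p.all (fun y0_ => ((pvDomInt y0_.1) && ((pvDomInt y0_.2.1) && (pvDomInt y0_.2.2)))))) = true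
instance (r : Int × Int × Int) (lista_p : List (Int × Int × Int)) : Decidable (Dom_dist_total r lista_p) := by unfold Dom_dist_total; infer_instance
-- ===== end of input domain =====

-- B replaces A's accumulator loop with a structural recursion on the remaining points,
-- closing back to r at the base case (objective: alternative, same cost).


-- ===== PORT A =====
def distancia_entre_dois_pontos (ponto1 ponto2 : Int × Int × Int) : Int :=
  |ponto1.2.1 - ponto2.2.1| + |ponto1.2.2 - ponto2.2.2|

def dist_total (r : Int × Int × Int) (lista_p : List (Int × Int × Int)) : Int :=
  let st := lista_p.foldl
    (fun (st : Int × (Int × Int × Int)) i =>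
      (st.1 + distancia_entre_dois_pontos st.2 i, i))
    (0, r)
  st.1 + distancia_entre_dois_pontos st.2 r

-- ===== PORT B =====
-- inner recursive helper 'tour' of Source B (r is its captured closure variable)
def pvTour (r p : Int × Int × Int) (rest : List (Int × Int × Int)) : Int :=
  match rest with
  | [] => |p.2.1 - r.2.1| + |p.2.2 - r.2.2|
  | q :: t => |p.2.1 - q.2.1| + |p.2.2 - q.2.2| + pvTour r q t

def dist_total_alt (r : Int × Int × Int) (lista_p : List (Int × Int × Int)) : Int :=
  pvTour r r lista_p

-- ===== PRECONDITION & SPEC =====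
def Spec_dist_total (r : Int × Int × Int) (lista_p : List (Int × Int × Int)) (out : Int) : Prop := out = dist_total_alt r lista_p
instance (r : Int × Int × Int) (lista_p : List (Int × Int × Int)) (out : Int) : Decidable (Spec_dist_total r lista_p out) := by unfold Spec_dist_total; infer_instance

-- ===== CLAIM (what is proved, stated in full; the proofs are below) =====
def Claim_equal_dist_total : Prop := ∀ (r : Int × Int × Int) (lista_p : List (Int × Int × Int)), Dom_dist_total r lista_p → Spec_dist_total r lista_p (dist_total r lista_p)

-- ===== LEMMAS AND PROOFS =====

-- Loop invariant: A's fold from state (c, p), plus the closing leg, equals c + B's tour from p.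
theorem pv_foldl_tour (l : List (Int × Int × Int)) (c : Int) (p r : Int × Int × Int) :
    (l.foldl
        (fun (st : Int × (Int × Int × Int)) i =>
          (st.1 + distancia_entre_dois_pontos st.2 i, i)) (c, p)).1
      + distancia_entre_dois_pontos
          (l.foldl
            (fun (st : Int × (Int × Int × Int)) i =>
              (st.1 + distancia_entre_dois_pontos st.2 i, i)) (c, p)).2 r
    = c + pvTour r p l := by
  induction l generalizing c p with
  | nil => simp [pvTour, distancia_entre_dois_pontos]
  | cons i t ih =>
      simp only [List.foldl_cons, pvTour]
      rw [ih]
      simp [distancia_entre_dois_pontos]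
      ring

-- ===== VERDICT (by name: the statement is the Claim_ definition above) =====
theorem dist_total_spec : Claim_equal_dist_total := by
  intro r lista_p _
  show dist_total r lista_p = dist_total_alt r lista_p
  simpa [dist_total, dist_total_alt] using pv_foldl_tour lista_p 0 r r
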